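-- pv_equiv track=rewrite | github.com/NSO-developer/ntool | ntool.5/python/ntool_verify.py | trim_config_lines
-- ===== SOURCE A (Python) =====
-- def trim_config_lines(cfg_lines, line_num):
--    '''Remove error lines from configuration stanza'''
--
--    line_num -= 1
--    count = 0
--    new_str = ""
--
--    for line in cfg_lines:
--       if line.startswith("** "):
--          count += 1
--          line_num += 1
--          continue
--       else:
--          if line_num == count:
--              cfg_lines[count] = "** " + cfg_lines[count]
--              break
--          else:
--              count += 1
--
--    for line2 in cfg_lines:
--       if line2.startswith("** "):
--          continue
--       new_str = new_str + line2 + "\n"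
--    return new_str
-- ===== SOURCE B (Python) =====
-- def trim_config_lines(cfg_lines, line_num):
--     '''Remove error lines from configuration stanza'''
--     # Single pass: count down through the non-error lines; the line on which
--     # the countdown hits zero is the one A would have marked, so it is simply
--     # omitted from the output.  No marking, no mutation, no second pass.
--     parts = []
--     k = line_num
--     for l in cfg_lines:
--         if not l.startswith("** "):
--             k -= 1
--             if k != 0:
--                 parts.append(l + "\n")
--     return "".join(parts)
-- ===== Notes on version B (the rewrite author's own statement) =====
-- stated objective: faster
-- what changed: A marks the target line in place with a '** ' prefix and then re-scans the list filtering all '** ' lines with quadratic repeated string concatenation; B is one fused pass with a countdown over the non-error lines that simply omits the line_num-th one and joins the kept lines once, never marking or mutating anything (the equivalence is about the return value; A's in-place mutation of cfg_lines is not reproduced).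
import Mathlib
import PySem

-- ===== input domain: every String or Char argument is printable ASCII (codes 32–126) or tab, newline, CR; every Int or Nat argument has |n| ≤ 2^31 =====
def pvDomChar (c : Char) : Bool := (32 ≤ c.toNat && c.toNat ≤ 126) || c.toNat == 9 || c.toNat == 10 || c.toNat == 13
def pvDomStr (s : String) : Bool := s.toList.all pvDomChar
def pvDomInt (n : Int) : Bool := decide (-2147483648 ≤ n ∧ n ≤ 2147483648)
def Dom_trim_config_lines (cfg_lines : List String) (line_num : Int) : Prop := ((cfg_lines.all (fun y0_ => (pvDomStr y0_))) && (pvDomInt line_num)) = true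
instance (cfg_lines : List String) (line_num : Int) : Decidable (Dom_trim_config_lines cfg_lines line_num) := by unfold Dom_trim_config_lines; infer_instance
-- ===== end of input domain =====

-- B replaces A's mark-in-place-then-filter two-pass design (with quadratic repeated
-- string concatenation) by ONE fused pass: a countdown over the non-error lines omits
-- the line_num-th one and the kept lines are joined once.  The equivalence is about the
-- RETURN VALUE: A mutates cfg_lines in place, B never mutates anything.

-- ===== PORT A =====
-- first loop of A: on '** ' lines bumps both counters, else either marks
-- cfg_lines[count] and breaks, or counts on.  Python breaks IMMEDIATELY after the
-- mutation, so the iteration never observes it: recursing over the original list is exact.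
def trimMarkLoop (orig : List String) : List String → Int → Int → List String
  | [], _, _ => orig
  | line :: rest, line_num, count =>
    if PySem.Str.startswith line "** " then
      trimMarkLoop orig rest (line_num + 1) (count + 1)
    else
      if line_num = count then
        PySem.List.pySetD orig count ("** " ++ PySem.List.pyGetD orig count "")
      else
        trimMarkLoop orig rest line_num (count + 1)

def trim_config_lines (cfg_lines : List String) (line_num : Int) : String :=
  let cfg1 := trimMarkLoop cfg_lines cfg_lines (line_num - 1) 0
  cfg1.foldl (fun new_str line2 =>
    if PySem.Str.startswith line2 "** " then new_str else new_str ++ line2 ++ "\n") ""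

-- ===== PORT B =====
def trim_config_lines_alt (cfg_lines : List String) (line_num : Int) : String :=
  let st := cfg_lines.foldl
    (fun (st : List String × Int) l =>
      if PySem.Str.startswith l "** " then st
      else
        let k := st.2 - 1
        if k ≠ 0 then (st.1 ++ [l ++ "\n"], k) else (st.1, k))
    ([], line_num)
  PySem.Str.join "" st.1

-- ===== PRECONDITION & SPEC =====
def Spec_trim_config_lines (cfg_lines : List String) (line_num : Int) (out : String) : Prop := out = trim_config_lines_alt cfg_lines line_num
instance (cfg_lines : List String) (line_num : Int) (out : String) : Decidable (Spec_trim_config_lines cfg_lines line_num out) := by unfold Spec_trim_config_lines; infer_instance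

-- ===== CLAIM (what is proved, stated in full; the proofs are below) =====
def Claim_equal_trim_config_lines : Prop := ∀ (cfg_lines : List String) (line_num : Int), Dom_trim_config_lines cfg_lines line_num → Spec_trim_config_lines cfg_lines line_num (trim_config_lines cfg_lines line_num)

-- ===== LEMMAS AND PROOFS =====

-- the "mark index i" operation A performs
def markAt (cfg : List String) (i : Int) : List String :=
  PySem.List.pySetD cfg i ("** " ++ PySem.List.pyGetD cfg i "")

-- position of the (d+1)-th non-error line (none if d < 0 or too few)
def nthNE : List String → Int → Option Nat
  | [], _ => none
  | l :: rest, d =>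
    if PySem.Str.startswith l "** " then (nthNE rest d).map (· + 1)
    else if d = 0 then some 0
    else (nthNE rest (d - 1)).map (· + 1)

-- A's first loop, characterised
lemma trimMark_eq : ∀ (rest cfg : List String) (d k : Int),
    trimMarkLoop cfg rest (d + k) k =
      (match nthNE rest d with
       | some j => markAt cfg (k + (j : Int))
       | none => cfg) := by
  intro rest
  induction rest with
  | nil => intro cfg d k; rfl
  | cons l rest ih =>
    intro cfg d k
    simp only [trimMarkLoop, nthNE]
    by_cases hs : PySem.Str.startswith l "** "
    · simp only [hs, if_true]
      have : d + k + 1 = d + (k + 1) := by ring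
      rw [this, ih cfg d (k + 1)]
      cases h : nthNE rest d with
      | none => simp
      | some j =>
        simp only [Option.map_some]
        have : k + 1 + (j : Int) = k + ((j : Int) + 1) := by ring
        simp [this]
    · simp only [hs, if_false, Bool.false_eq_true]
      by_cases hd : d = 0
      · have h0 : d + k = k := by omega
        simp [hd, markAt]
      · have hne : ¬ (d + k = k) := by omega
        simp only [hne, if_false, hd]
        have : d + k = (d - 1) + (k + 1) := by ring
        rw [this, ih cfg (d - 1) (k + 1)]
        cases h : nthNE rest (d - 1) with
        | none => simp
        | some j =>
          simp only [Option.map_some]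
          have : k + 1 + (j : Int) = k + ((j : Int) + 1) := by ring
          simp [this]

-- the rendered lines of a marked-or-not list
def filtLines (xs : List String) : List String :=
  (xs.filter (fun l => !(PySem.Str.startswith l "** "))).map (fun l => l ++ "\n")

-- B's loop, characterised recursively (parts only; the countdown k is threaded)
def bgo : List String → Int → List String
  | [], _ => []
  | l :: rest, k =>
    if PySem.Str.startswith l "** " then bgo rest k
    else if k - 1 ≠ 0 then (l ++ "\n") :: bgo rest (k - 1)
    else bgo rest (k - 1)

lemma bfold_eq : ∀ (xs : List String) (parts : List String) (k : Int),
    (xs.foldl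
      (fun (st : List String × Int) l =>
        if PySem.Str.startswith l "** " then st
        else
          let k := st.2 - 1
          if k ≠ 0 then (st.1 ++ [l ++ "\n"], k) else (st.1, k))
      (parts, k)).1 = parts ++ bgo xs k := by
  intro xs
  induction xs with
  | nil => intro parts k; simp [bgo]
  | cons l rest ih =>
    intro parts k
    simp only [List.foldl_cons, bgo]
    by_cases hs : PySem.Str.startswith l "** "
    · simp only [hs, if_true]
      exact ih parts k
    · simp only [hs, Bool.false_eq_true, if_false]
      by_cases hk : k - 1 = 0
      · simp only [ne_eq, hk, not_true_eq_false, if_false]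
        have h := ih parts (k - 1)
        rw [hk] at h
        exact h
      · simp only [ne_eq, hk, not_false_eq_true, if_true]
        rw [ih (parts ++ [l ++ "\n"]) (k - 1)]
        simp

lemma bgo_nonpos : ∀ (xs : List String) (k : Int), k ≤ 0 → bgo xs k = filtLines xs := by
  intro xs
  induction xs with
  | nil => intro k _; rfl
  | cons l rest ih =>
    intro k hk
    simp only [bgo, filtLines, List.filter_cons]
    by_cases hs : PySem.Str.startswith l "** "
    · simp only [hs, if_true, Bool.not_true, Bool.false_eq_true, if_false]
      exact ih k hk
    · have hk1 : k - 1 ≠ 0 := by omega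
      simp only [hs, Bool.false_eq_true, if_false, ne_eq, hk1, not_false_eq_true,
        if_true, Bool.not_false, List.map_cons]
      rw [ih (k - 1) (by omega)]
      rfl

lemma startswith_mark (s : String) :
    PySem.Str.startswith ("** " ++ s) "** " = true := by
  simp [PySem.Chars.startswith_iff]

-- core: A's mark-then-filter equals B's countdown pass
lemma filtLines_cons_err (l : String) (rest : List String)
    (hs : PySem.Str.startswith l "** " = true) :
    filtLines (l :: rest) = filtLines rest := by
  simp only [filtLines, List.filter_cons, hs, Bool.not_true, Bool.false_eq_true, if_false]

lemma filtLines_cons_ok (l : String) (rest : List String)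
    (hs : PySem.Str.startswith l "** " = false) :
    filtLines (l :: rest) = (l ++ "\n") :: filtLines rest := by
  simp only [filtLines, List.filter_cons, hs, Bool.not_false, if_true, List.map_cons]

lemma markAt_cons_succ (l : String) (rest : List String) (j : Nat) :
    markAt (l :: rest) (((j + 1 : Nat)) : Int) = l :: markAt rest (j : Int) := by
  simp only [markAt, PySem.List.pySetD_natCast, PySem.List.pyGetD_natCast]
  rfl

lemma markAt_cons_zero (l : String) (rest : List String) :
    markAt (l :: rest) (((0 : Nat)) : Int) = ("** " ++ l) :: rest := by
  simp only [markAt, PySem.List.pySetD_natCast, PySem.List.pyGetD_natCast]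
  rfl

lemma mark_filter_eq_bgo : ∀ (cfg : List String) (d : Int),
    filtLines (match nthNE cfg d with
               | some j => markAt cfg (j : Int)
               | none => cfg) = bgo cfg (d + 1) := by
  intro cfg
  induction cfg with
  | nil => intro d; cases h : nthNE ([] : List String) d <;> rfl
  | cons l rest ih =>
    intro d
    simp only [nthNE, bgo]
    by_cases hs : PySem.Str.startswith l "** "
    · simp only [hs, if_true]
      cases h : nthNE rest d with
      | none =>
        simp only [Option.map_none]
        show filtLines (l :: rest) = bgo rest (d + 1)
        rw [filtLines_cons_err l rest hs]
        have h2 := ih d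
        rw [h] at h2
        exact h2
      | some j =>
        simp only [Option.map_some]
        show filtLines (markAt (l :: rest) (((j + 1 : Nat)) : Int)) = bgo rest (d + 1)
        rw [markAt_cons_succ, filtLines_cons_err l _ hs]
        have h2 := ih d
        rw [h] at h2
        exact h2
    · simp only [hs, Bool.false_eq_true, if_false]
      by_cases hd : d = 0
      · subst hd
        have h0 : (0 : Int) + 1 - 1 = 0 := by ring
        simp only [h0, ne_eq, not_true_eq_false, if_false]
        show filtLines (markAt (l :: rest) (((0 : Nat)) : Int)) = bgo rest 0
        rw [markAt_cons_zero, filtLines_cons_err _ _ (startswith_mark l),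
          bgo_nonpos rest 0 le_rfl]
      · simp only [hd, if_false]
        have hk1 : d + 1 - 1 ≠ 0 := by omega
        simp only [ne_eq, hk1, not_false_eq_true, if_true]
        have harith : d + 1 - 1 = (d - 1) + 1 := by ring
        cases h : nthNE rest (d - 1) with
        | none =>
          simp only [Option.map_none]
          show filtLines (l :: rest) = (l ++ "\n") :: bgo rest (d + 1 - 1)
          rw [filtLines_cons_ok l rest (Bool.eq_false_iff.mpr hs), harith]
          have h2 := ih (d - 1)
          rw [h] at h2
          rw [h2]
        | some j =>
          simp only [Option.map_some]
          show filtLines (markAt (l :: rest) (((j + 1 : Nat)) : Int)) =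
            (l ++ "\n") :: bgo rest (d + 1 - 1)
          rw [markAt_cons_succ, filtLines_cons_ok l _ (Bool.eq_false_iff.mpr hs), harith]
          have h2 := ih (d - 1)
          rw [h] at h2
          rw [h2]

lemma join_empty_cons (x : String) (xs : List String) :
    PySem.Str.join "" (x :: xs) = x ++ PySem.Str.join "" xs := by
  simp [PySem.Str.join]
  cases xs with
  | nil => simp [PySem.Chars.join_singleton]
  | cons q r => simp [PySem.Chars.join_cons_cons]

-- A's second loop renders exactly filtLines, joined
lemma render_eq : ∀ (xs : List String) (acc : String),
    xs.foldl (fun new_str line2 =>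
      if PySem.Str.startswith line2 "** " then new_str else new_str ++ line2 ++ "\n") acc
    = acc ++ PySem.Str.join "" (filtLines xs) := by
  intro xs
  induction xs with
  | nil => intro acc; simp [filtLines, PySem.Str.join, PySem.Chars.join_nil]
  | cons l rest ih =>
    intro acc
    simp only [List.foldl_cons, filtLines, List.filter_cons]
    by_cases hs : PySem.Str.startswith l "** "
    · simp only [hs, if_true, Bool.not_true]
      rw [ih acc]
      simp [filtLines]
    · simp only [hs, if_false, Bool.not_false, Bool.false_eq_true]
      rw [ih (acc ++ l ++ "\n")]
      simp only [if_true, List.map_cons, join_empty_cons, filtLines]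
      simp [String.append_assoc]

-- ===== VERDICT (by name: the statement is the Claim_ definition above) =====
theorem trim_config_lines_spec : Claim_equal_trim_config_lines := by
  intro cfg_lines line_num _
  unfold Spec_trim_config_lines trim_config_lines trim_config_lines_alt
  simp only []
  rw [render_eq, bfold_eq]
  have hA : trimMarkLoop cfg_lines cfg_lines (line_num - 1) 0 =
      (match nthNE cfg_lines (line_num - 1) with
       | some j => markAt cfg_lines ((j : Int))
       | none => cfg_lines) := by
    have h := trimMark_eq cfg_lines cfg_lines (line_num - 1) 0
    rw [show (line_num - 1) + 0 = line_num - 1 by ring] at h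
    rw [h]
    cases nthNE cfg_lines (line_num - 1) <;> simp
  rw [hA, mark_filter_eq_bgo cfg_lines (line_num - 1)]
  rw [show line_num - 1 + 1 = line_num by ring]
  simp
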